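-- pv_equiv track=rewrite | github.com/MauriceCalvert/andante | engine/bob/complains.py | _voice_names_for_count
-- ===== SOURCE A (Python) =====
-- def _voice_names_for_count(voice_count: int) -> list[str]:
--     """Get voice names appropriate for the voice count."""
--     if voice_count == 2:
--         return ["soprano", "bass"]
--     elif voice_count == 3:
--         return ["soprano", "alto", "bass"]
--     elif voice_count == 4:
--         return ["soprano", "alto", "tenor", "bass"]
--     else:
--         return [f"v{i}" for i in range(voice_count)]
-- ===== SOURCE B (Python) =====
-- def _voice_name(i: int, n: int) -> str:
--     """Name of voice i (0-based) in an n-voice texture."""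
--     if not (2 <= n <= 4):
--         return f"v{i}"
--     if i == 0:
--         return "soprano"
--     if i == n - 1:
--         return "bass"
--     return ("alto", "tenor")[i - 1]
--
--
-- def _voice_names_for_count(voice_count: int) -> list[str]:
--     """Get voice names appropriate for the voice count."""
--     return [_voice_name(i, voice_count) for i in range(voice_count)]
-- ===== Notes on version B (the rewrite author's own statement) =====
-- stated objective: alternative
-- what changed: Replaces A's branch-on-count lookup of whole literal lists with a single uniform comprehension over range(voice_count) that names each voice by its position (first=soprano, last=bass, middles=alto/tenor, or v{i} outside 2..4).
import Mathlib
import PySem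

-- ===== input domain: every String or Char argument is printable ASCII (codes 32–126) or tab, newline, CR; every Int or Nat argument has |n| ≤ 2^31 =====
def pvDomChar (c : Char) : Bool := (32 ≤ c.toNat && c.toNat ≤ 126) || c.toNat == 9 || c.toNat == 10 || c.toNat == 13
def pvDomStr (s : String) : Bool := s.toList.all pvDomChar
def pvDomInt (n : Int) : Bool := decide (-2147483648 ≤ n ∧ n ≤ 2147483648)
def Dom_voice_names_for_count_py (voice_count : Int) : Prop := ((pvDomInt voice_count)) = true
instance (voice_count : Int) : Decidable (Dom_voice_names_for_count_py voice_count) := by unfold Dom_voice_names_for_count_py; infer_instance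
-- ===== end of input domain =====

-- B names each voice by its position in one uniform comprehension instead of A's branch-on-count whole-list returns (objective: alternative).


-- ===== PORT A =====
def voice_names_for_count_py (voice_count : Int) : List String :=
  if voice_count = 2 then ["soprano", "bass"]
  else if voice_count = 3 then ["soprano", "alto", "bass"]
  else if voice_count = 4 then ["soprano", "alto", "tenor", "bass"]
  else (PySem.List.pyRange 0 voice_count 1).map (fun i => "v" ++ PySem.Int.toStr i)

-- ===== PORT B =====
-- tuple index ("alto","tenor")[i-1]: Python raises IndexError out of range, pyGet? returns none;
-- the caller only passes 1 ≤ i ≤ n-2 ≤ 2, so none is never reached (the "" default is dead).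
def voiceName (i : Int) (n : Int) : String :=
  if ¬ (2 ≤ n ∧ n ≤ 4) then "v" ++ PySem.Int.toStr i
  else if i = 0 then "soprano"
  else if i = n - 1 then "bass"
  else (PySem.List.pyGet? ["alto", "tenor"] (i - 1)).getD ""

def voice_names_for_count_py_alt (voice_count : Int) : List String :=
  (PySem.List.pyRange 0 voice_count 1).map (fun i => voiceName i voice_count)

-- ===== PRECONDITION & SPEC =====
def Spec_voice_names_for_count_py (voice_count : Int) (out : List String) : Prop := out = voice_names_for_count_py_alt voice_count
instance (voice_count : Int) (out : List String) : Decidable (Spec_voice_names_for_count_py voice_count out) := by unfold Spec_voice_names_for_count_py; infer_instance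

-- ===== CLAIM (what is proved, stated in full; the proofs are below) =====
def Claim_equal_voice_names_for_count_py : Prop := ∀ (voice_count : Int), Dom_voice_names_for_count_py voice_count → Spec_voice_names_for_count_py voice_count (voice_names_for_count_py voice_count)

-- ===== LEMMAS AND PROOFS =====

-- ===== VERDICT (by name: the statement is the Claim_ definition above) =====
theorem voice_names_for_count_py_spec : Claim_equal_voice_names_for_count_py := by
  intro voice_count _
  unfold Spec_voice_names_for_count_py voice_names_for_count_py voice_names_for_count_py_alt
  by_cases h2 : voice_count = 2
  · subst h2; decide
  by_cases h3 : voice_count = 3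
  · subst h3; decide
  by_cases h4 : voice_count = 4
  · subst h4; decide
  have hg : ¬ (2 ≤ voice_count ∧ voice_count ≤ 4) := by omega
  simp [h2, h3, h4, voiceName, hg]
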